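-- pv_equiv track=rewrite | github.com/LPC-CSDept/midterm-1-question-1-hxxu0007 | count_even_consequ.py | count_consecutive_even
-- ===== SOURCE A (Python) =====
-- def count_consecutive_even(numbers):
--     """
--     Counts the number of sequences of consecutive even numbers in a list.
--
--     Args:
--         numbers (list): List of integers.
--
--     Returns:
--         int: Number of sequences with at least 2 consecutive even numbers.
--     """
--     consecutive_count = 0
--     current_count = 0
--
--     for num in numbers:
--         if num % 2 == 0:
--             current_count += 1
--             if current_count == 2:
--                 consecutive_count += 1
--         else:
--             current_count = 0
--
--     return consecutive_count
-- ===== SOURCE B (Python) =====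
-- def count_consecutive_even(numbers):
--     """
--     Counts the number of sequences of consecutive even numbers in a list.
--
--     Args:
--         numbers (list): List of integers.
--
--     Returns:
--         int: Number of sequences with at least 2 consecutive even numbers.
--     """
--     # Partition the list into maximal runs of equal parity, then count
--     # the even runs of length >= 2.
--     runs = []
--     i = 0
--     n = len(numbers)
--     while i < n:
--         key = numbers[i] % 2 == 0
--         j = i + 1
--         while j < n and (numbers[j] % 2 == 0) == key:
--             j += 1
--         runs.append((key, j - i))
--         i = j
--     return sum(1 for key, length in runs if key and length >= 2)
-- ===== Notes on version B (the rewrite author's own statement) =====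
-- stated objective: alternative
-- what changed: B first partitions the list into maximal runs of equal parity (a run-length grouping pass) and then counts the even runs of length >= 2, instead of A's inline per-element counter state machine.
import Mathlib
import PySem

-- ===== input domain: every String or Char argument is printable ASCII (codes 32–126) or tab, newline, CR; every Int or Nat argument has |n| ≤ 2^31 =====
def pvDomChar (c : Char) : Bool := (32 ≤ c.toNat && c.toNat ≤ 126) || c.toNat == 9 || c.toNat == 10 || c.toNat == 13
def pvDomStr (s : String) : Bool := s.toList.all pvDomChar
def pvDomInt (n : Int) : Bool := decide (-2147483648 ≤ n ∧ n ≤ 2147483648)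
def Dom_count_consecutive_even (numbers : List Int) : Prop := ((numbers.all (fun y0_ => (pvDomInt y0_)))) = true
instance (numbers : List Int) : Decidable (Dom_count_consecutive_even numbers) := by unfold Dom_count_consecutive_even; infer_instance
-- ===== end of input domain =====

-- B partitions the list into maximal runs of equal parity and counts the even runs
-- of length ≥ 2, instead of A's inline per-element counter state machine (objective: alternative).

-- ===== PORT A =====
-- literal port of A: one pass with the pair of counters (consecutive_count, current_count)
def count_consecutive_even (numbers : List Int) : Int :=
  (numbers.foldl
    (fun (s : Int × Int) num =>
      if PySem.Int.mod num 2 = 0 then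
        let cur := s.2 + 1
        (if cur = 2 then s.1 + 1 else s.1, cur)
      else (s.1, 0))
    (0, 0)).1

-- ===== PORT B =====
-- Source B's grouping pass: maximal runs of equal parity as (key, length) pairs;
-- 'rest = rest[i:]' is the drop of the scanned prefix.
def pvGroupParity : List Int → List (Bool × Int)
  | [] => []
  | x :: xs =>
    let key := decide (PySem.Int.mod x 2 = 0)
    let t := xs.takeWhile (fun y => decide (PySem.Int.mod y 2 = 0) == key)
    (key, (t.length : Int) + 1) :: pvGroupParity (xs.drop t.length)
termination_by l => l.length
decreasing_by
  simp only [List.length_cons]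
  have := List.length_drop (l := xs)
    (i := (xs.takeWhile (fun y => decide (PySem.Int.mod y 2 = 0) ==
      decide (PySem.Int.mod x 2 = 0))).length)
  omega

-- Source B's final 'sum(1 for key, length in runs if key and length >= 2)'
def count_consecutive_even_alt (numbers : List Int) : Int :=
  (pvGroupParity numbers).foldl
    (fun acc g => if g.1 && decide (2 ≤ g.2) then acc + 1 else acc) 0

-- ===== PRECONDITION & SPEC =====
def Spec_count_consecutive_even (numbers : List Int) (out : Int) : Prop := out = count_consecutive_even_alt numbers
instance (numbers : List Int) (out : Int) : Decidable (Spec_count_consecutive_even numbers out) := by unfold Spec_count_consecutive_even; infer_instance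

-- ===== CLAIM (what is proved, stated in full; the proofs are below) =====
def Claim_equal_count_consecutive_even : Prop := ∀ (numbers : List Int), Dom_count_consecutive_even numbers → Spec_count_consecutive_even numbers (count_consecutive_even numbers)

-- ===== LEMMAS AND PROOFS =====

theorem takeWhile_drop_eq_dropWhile {α : Type} (p : α → Bool) :
    ∀ l : List α, l.drop (l.takeWhile p).length = l.dropWhile p := by
  intro l
  induction l with
  | nil => rfl
  | cons x xs ih =>
    by_cases h : p x
    · simp [h, ih]
    · simp [h]

theorem dropWhile_head_false {α : Type} (p : α → Bool) :
    ∀ (l : List α) (y : α) (r' : List α), l.dropWhile p = y :: r' → p y = false := by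
  intro l
  induction l with
  | nil => intro y r' h; simp at h
  | cons x xs ih =>
    intro y r' h
    by_cases hx : p x
    · rw [List.dropWhile_cons, if_pos hx] at h; exact ih y r' h
    · rw [List.dropWhile_cons, if_neg hx] at h
      cases h; simpa using hx

-- A's fold, abstracted over the incoming current_count, returning only the total
def fA : Int → List Int → Int
  | _, [] => 0
  | k, x :: xs =>
    if PySem.Int.mod x 2 = 0 then (if k + 1 = 2 then 1 else 0) + fA (k + 1) xs
    else fA 0 xs

theorem fold_eq_fA (l : List Int) : ∀ (c k : Int),
    (l.foldl
      (fun (s : Int × Int) num =>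
        if PySem.Int.mod num 2 = 0 then
          let cur := s.2 + 1
          (if cur = 2 then s.1 + 1 else s.1, cur)
        else (s.1, 0))
      (c, k)).1 = c + fA k l := by
  induction l with
  | nil => intro c k; simp only [List.foldl_nil, fA]; omega
  | cons x xs ih =>
    intro c k
    by_cases h : PySem.Int.mod x 2 = 0
    · simp only [List.foldl_cons, if_pos h, fA, ih]
      split_ifs <;> omega
    · simp only [List.foldl_cons, if_neg h, fA, ih]

theorem fA_even_run (t : List Int) : ∀ (r : List Int) (k : Int),
    (∀ x ∈ t, PySem.Int.mod x 2 = 0) →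
    fA k (t ++ r) = (if k < 2 ∧ 2 ≤ k + t.length then 1 else 0) + fA (k + t.length) r := by
  induction t with
  | nil =>
    intro r k _
    have h0 : ¬ (k < 2 ∧ 2 ≤ k + ((0 : Nat) : Int)) := by push_cast; omega
    simp only [List.nil_append, List.length_nil, if_neg h0]
    push_cast; rw [add_zero]; omega
  | cons x t ih =>
    intro r k h
    have hx : PySem.Int.mod x 2 = 0 := h x (by simp)
    have e : k + (((t.length + 1 : Nat)) : Int) = k + 1 + (t.length : Int) := by push_cast; ring
    simp only [List.cons_append, fA, if_pos hx,
      ih r (k + 1) (fun y hy => h y (by simp [hy])), List.length_cons, e]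
    split_ifs <;> push_cast at * <;> omega

theorem fA_odd_run (t : List Int) : ∀ (r : List Int),
    (∀ x ∈ t, ¬ PySem.Int.mod x 2 = 0) → fA 0 (t ++ r) = fA 0 r := by
  induction t with
  | nil => intro r _; rfl
  | cons x t ih =>
    intro r h
    simp only [List.cons_append, fA, if_neg (h x (by simp))]
    exact ih r (fun y hy => h y (by simp [hy]))

theorem fA_reset (r : List Int)
    (h : ∀ y, r.head? = some y → ¬ PySem.Int.mod y 2 = 0) (k : Int) :
    fA k r = fA 0 r := by
  cases r with
  | nil => rfl
  | cons y r' =>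
    simp only [fA]
    rw [if_neg (h y rfl), if_neg (h y rfl)]

theorem cnt_shift (gs : List (Bool × Int)) : ∀ (a : Int),
    gs.foldl (fun acc g => if g.1 && decide (2 ≤ g.2) then acc + 1 else acc) a
      = a + gs.foldl (fun acc g => if g.1 && decide (2 ≤ g.2) then acc + 1 else acc) 0 := by
  induction gs with
  | nil => intro a; simp
  | cons g gs ih =>
    intro a
    simp only [List.foldl_cons]
    rw [ih, ih (if g.1 && decide (2 ≤ g.2) then (0 : Int) + 1 else 0)]
    split_ifs <;> omega

theorem fA_eq_alt : ∀ (n : Nat) (l : List Int), l.length ≤ n →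
    fA 0 l = (pvGroupParity l).foldl
      (fun acc g => if g.1 && decide (2 ≤ g.2) then acc + 1 else acc) 0 := by
  intro n
  induction n with
  | zero =>
    intro l hl
    have h0 : l = [] := List.length_eq_zero_iff.mp (Nat.le_zero.mp hl)
    subst h0
    rw [pvGroupParity]
    rfl
  | succ n ih =>
    intro l hl
    match l with
    | [] => rw [pvGroupParity]; rfl
    | x :: xs =>
      set key := decide (PySem.Int.mod x 2 = 0) with hkey
      set p : Int → Bool := fun y => decide (PySem.Int.mod y 2 = 0) == key with hp
      set t := xs.takeWhile p with ht
      set r := xs.drop t.length with hr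
      have hrw : r = xs.dropWhile p := by rw [hr, ht, takeWhile_drop_eq_dropWhile]
      have hxs : t ++ r = xs := by rw [hrw, ht]; exact List.takeWhile_append_dropWhile
      have hrlen : r.length ≤ n := by
        have h1 : t.length + r.length = xs.length := by rw [← hxs]; simp
        simp only [List.length_cons] at hl; omega
      have hgroup : pvGroupParity (x :: xs)
          = (key, (t.length : Int) + 1) :: pvGroupParity r := by
        rw [pvGroupParity]
      have ihr := ih r hrlen
      rw [hgroup, List.foldl_cons, cnt_shift, ← ihr]
      by_cases hx : PySem.Int.mod x 2 = 0
      · -- even run: x :: t is all even, and r starts with an odd element (or is empty)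
        have hkeyT : key = true := by rw [hkey]; exact decide_eq_true hx
        have htEven : ∀ y ∈ t, PySem.Int.mod y 2 = 0 := by
          intro y hy
          have hpy := List.mem_takeWhile_imp (ht ▸ hy)
          rw [hp, hkeyT] at hpy
          simpa using hpy
        have hrHead : ∀ y, r.head? = some y → ¬ PySem.Int.mod y 2 = 0 := by
          intro y hy
          cases hcr : r with
          | nil => rw [hcr] at hy; simp at hy
          | cons z r' =>
            have hz : z = y := by rw [hcr] at hy; simpa using hy
            have hpz := dropWhile_head_false p xs z r' (by rw [← hrw]; exact hcr)
            rw [hp, hkeyT] at hpz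
            rw [← hz]
            simpa using hpz
        have hall : ∀ y ∈ x :: t, PySem.Int.mod y 2 = 0 := by
          intro y hy; rcases List.mem_cons.mp hy with h | h
          · subst h; exact hx
          · exact htEven y h
        have hsplit : fA 0 (x :: xs) = fA 0 ((x :: t) ++ r) := by
          rw [List.cons_append, hxs]
        rw [hsplit, fA_even_run (x :: t) r 0 hall, fA_reset r hrHead]
        simp only [hkeyT, Bool.true_and, List.length_cons, decide_eq_true_eq]
        split_ifs <;> omega
      · -- odd run: x :: t is all odd; the run contributes nothing
        have hkeyF : key = false := by rw [hkey]; exact decide_eq_false hx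
        have htOdd : ∀ y ∈ t, ¬ PySem.Int.mod y 2 = 0 := by
          intro y hy
          have hpy := List.mem_takeWhile_imp (ht ▸ hy)
          rw [hp, hkeyF] at hpy
          simpa using hpy
        have hall : ∀ y ∈ x :: t, ¬ PySem.Int.mod y 2 = 0 := by
          intro y hy; rcases List.mem_cons.mp hy with h | h
          · subst h; exact hx
          · exact htOdd y h
        have hsplit : fA 0 (x :: xs) = fA 0 ((x :: t) ++ r) := by
          rw [List.cons_append, hxs]
        rw [hsplit, fA_odd_run (x :: t) r hall]
        simp [hkeyF]

-- ===== VERDICT (by name: the statement is the Claim_ definition above) =====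
theorem count_consecutive_even_spec : Claim_equal_count_consecutive_even := by
  intro numbers _
  unfold Spec_count_consecutive_even count_consecutive_even count_consecutive_even_alt
  rw [fold_eq_fA numbers 0 0, fA_eq_alt numbers.length numbers (le_refl _)]
  omega
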